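-- pv_equiv track=rewrite | github.com/legend-L24/ff_optimizer | sampler/aiidamof.py | custom_uppercase
-- ===== SOURCE A (Python) =====
-- def custom_uppercase(s):
--     elements = ['Al', 'Mg', 'Ca','Ga','In','Ba','Sr',"Py"]  # 定义需要保留第二个字母小写的元素列表
--     result = []
--     i = 0
--     while i < len(s):
--         if i + 1 < len(s) and s[i:i+2] in elements:  # 检查是否是元素名称
--             result.append(s[i:i+2])  # 将元素名称直接添加到结果中
--             i += 2
--         else:
--             result.append(s[i].upper())  # 否则将字符转换为大写并添加到结果中
--             i += 1
--     return ''.join(result)# 测试例子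
-- ===== SOURCE B (Python) =====
-- def custom_uppercase(s):
--     PAIRS = {('A', 'l'), ('M', 'g'), ('C', 'a'), ('G', 'a'),
--              ('I', 'n'), ('B', 'a'), ('S', 'r'), ('P', 'y')}
--     out = []
--     pending = None  # one char not yet emitted, possible first letter of an element
--     for c in s:
--         if pending is None:
--             pending = c
--         elif (pending, c) in PAIRS:
--             out.append(pending)
--             out.append(c)
--             pending = None
--         else:
--             out.append(pending.upper())
--             pending = c
--     if pending is not None:
--         out.append(pending.upper())
--     return ''.join(out)
-- ===== Notes on version B (the rewrite author's own statement) =====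
-- stated objective: alternative
-- what changed: Replaces A's index-based while loop with string slicing and membership in a list of two-char strings by a single left-to-right fold over the characters carrying one pending character (a small state machine) with element names checked as character pairs in a set.
import Mathlib
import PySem

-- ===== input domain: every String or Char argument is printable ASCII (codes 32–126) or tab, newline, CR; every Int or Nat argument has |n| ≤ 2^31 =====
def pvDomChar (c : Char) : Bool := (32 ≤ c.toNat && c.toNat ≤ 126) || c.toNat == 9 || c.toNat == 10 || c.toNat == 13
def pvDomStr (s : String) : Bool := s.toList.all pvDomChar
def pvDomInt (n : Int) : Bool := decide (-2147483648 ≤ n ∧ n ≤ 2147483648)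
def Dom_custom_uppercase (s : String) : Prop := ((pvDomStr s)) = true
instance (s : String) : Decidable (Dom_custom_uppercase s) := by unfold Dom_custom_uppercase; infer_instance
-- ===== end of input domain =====

-- B replaces A's index/slice while-loop by a single left fold carrying one pending
-- character (a small state machine); same return value, alternative decomposition.

-- ===== PORT A =====
-- elements = ['Al','Mg','Ca','Ga','In','Ba','Sr','Py'] (as char lists; s[i:i+2] is two chars)
def pvElementsA : List (List Char) :=
  [['A','l'], ['M','g'], ['C','a'], ['G','a'], ['I','n'], ['B','a'], ['S','r'], ['P','y']]

-- the while-loop on index i, as recursion on the suffix s[i:]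
def pvGoA : List Char → List (List Char)
  | [] => []
  | [c] => [[PySem.Chars.upperChar c]]
  | c :: d :: rest =>
      if pvElementsA.contains [c, d] then [c, d] :: pvGoA rest
      else [PySem.Chars.upperChar c] :: pvGoA (d :: rest)

def custom_uppercase (s : String) : String :=
  String.ofList (PySem.Chars.join [] (pvGoA s.toList))

-- ===== PORT B =====
def pvPairsB : List (Char × Char) :=
  [('A','l'), ('M','g'), ('C','a'), ('G','a'), ('I','n'), ('B','a'), ('S','r'), ('P','y')]

-- one step of the fold: state = (emitted chars, pending char)
def pvStepB (st : List Char × Option Char) (c : Char) : List Char × Option Char :=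
  match st with
  | (out, none) => (out, some c)
  | (out, some p) =>
      if pvPairsB.contains (p, c) then (out ++ [p, c], none)
      else (out ++ [PySem.Chars.upperChar p], some c)

def pvFlushB : Option Char → List Char
  | none => []
  | some p => [PySem.Chars.upperChar p]

-- final ''.join(out) after flushing the pending char
def pvFinishB (st : List Char × Option Char) : String :=
  String.ofList (st.1 ++ pvFlushB st.2)

def custom_uppercase_alt (s : String) : String :=
  pvFinishB (s.toList.foldl pvStepB ([], none))

-- ===== PRECONDITION & SPEC =====
def Spec_custom_uppercase (s : String) (out : String) : Prop := out = custom_uppercase_alt s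
instance (s : String) (out : String) : Decidable (Spec_custom_uppercase s out) := by unfold Spec_custom_uppercase; infer_instance

-- ===== CLAIM (what is proved, stated in full; the proofs are below) =====
def Claim_equal_custom_uppercase : Prop := ∀ (s : String), Dom_custom_uppercase s → Spec_custom_uppercase s (custom_uppercase s)

-- ===== LEMMAS AND PROOFS =====

-- ''.join of the pieces is their concatenation
theorem pv_join_nil_flatten (ps : List (List Char)) : PySem.Chars.join [] ps = ps.flatten := by
  induction ps with
  | nil => simp [pysem]
  | cons p ps ih =>
      cases ps with
      | nil => simp [pysem]
      | cons q ps => simpa [pysem] using ih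

-- A's string-slice membership test and B's char-pair membership test agree
theorem pv_pair_mem (p c : Char) :
    [p, c] ∈ pvElementsA ↔ (p, c) ∈ pvPairsB := by
  simp [pvElementsA, pvPairsB, List.mem_cons, Prod.mk.injEq]

-- the pending char prepended to the unread suffix
def pvPend : Option Char → List Char → List Char
  | none, cs => cs
  | some p, cs => p :: cs

-- loop invariant: B's fold state equals A's output on the pending-extended suffix
theorem pv_main (cs : List Char) : ∀ (out : List Char) (p? : Option Char),
    (cs.foldl pvStepB (out, p?)).1 ++ pvFlushB (cs.foldl pvStepB (out, p?)).2
      = out ++ (pvGoA (pvPend p? cs)).flatten := by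
  induction cs with
  | nil =>
      intro out p?
      cases p? <;> simp [pvPend, pvGoA, pvFlushB]
  | cons c cs ih =>
      intro out p?
      cases p? with
      | none =>
          simpa [pvStepB, pvPend] using ih out (some c)
      | some p =>
          by_cases h : (p, c) ∈ pvPairsB
          · have hb : pvPairsB.contains (p, c) = true := by simpa using h
            have hA : [p, c] ∈ pvElementsA := (pv_pair_mem p c).mpr h
            have hcA : pvElementsA.contains [p, c] = true := by simpa using hA
            have := ih (out ++ [p, c]) none
            simp only [pvPend] at this
            simp only [List.foldl_cons, pvStepB, hb, pvPend, this, pvGoA, hcA, if_true,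
              List.flatten_cons, List.append_assoc, List.cons_append, List.nil_append]
          · have hb : pvPairsB.contains (p, c) = false := by simpa using h
            have hA : [p, c] ∉ pvElementsA := fun hm => h ((pv_pair_mem p c).mp hm)
            have hcA : pvElementsA.contains [p, c] = false := by simpa using hA
            have := ih (out ++ [PySem.Chars.upperChar p]) (some c)
            simp only [pvPend] at this
            simp only [List.foldl_cons, pvStepB, hb, hcA, Bool.false_eq_true, if_false, pvPend,
              this, pvGoA, List.flatten_cons, List.append_assoc, List.cons_append,
              List.nil_append]

-- ===== VERDICT (by name: the statement is the Claim_ definition above) =====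
theorem custom_uppercase_spec : Claim_equal_custom_uppercase := by
  intro s _
  unfold Spec_custom_uppercase custom_uppercase custom_uppercase_alt pvFinishB
  rw [pv_join_nil_flatten]
  have := pv_main s.toList [] none
  simp only [pvPend, List.nil_append] at this
  rw [this]
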